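-- pv_equiv track=rewrite | github.com/queelius/computational-explorations | src/primitive_coprime.py | smart_greedy
-- ===== SOURCE A (Python) =====
-- import math
-- from typing import Set, List, Tuple, Dict, Any, Optional
--
-- def coprime_pair_count(A: Set[int]) -> int:
--     """Count coprime pairs in A."""
--     A_list = sorted(A)
--     count = 0
--     for i in range(len(A_list)):
--         for j in range(i + 1, len(A_list)):
--             if math.gcd(A_list[i], A_list[j]) == 1:
--                 count += 1
--     return count
--
-- def smart_greedy(n: int) -> Tuple[int, Set[int]]:
--     """
--     Smart greedy: start empty, add elements maximizing marginal M(A) gain.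
--
--     At each step, add the element that creates the most new coprime pairs.
--     """
--     current = set()
--     all_elements = list(range(2, n + 1))
--
--     while True:
--         best_gain = -1
--         best_add = None
--
--         for x in all_elements:
--             if x in current:
--                 continue
--             ok = all(x % c != 0 and c % x != 0 for c in current)
--             if not ok:
--                 continue
--             gain = sum(1 for c in current if math.gcd(x, c) == 1)
--             # For the first element, gain=0 but we still want to add it
--             if len(current) == 0:
--                 gain = 0
--             if gain > best_gain:
--                 best_gain = gain
--                 best_add = x
--
--         if best_add is None:
--             break
--         if len(current) > 0 and best_gain == 0:
--             break
--         current.add(best_add)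
--
--     M = coprime_pair_count(current)
--     return M, current
-- ===== SOURCE B (Python) =====
-- import math
--
--
-- def smart_greedy(n):
--     """Incremental greedy: keep per-candidate coprime-gain counters and a pruned
--     candidate list, updated once per added element instead of rescanning the
--     whole current set for every candidate on every round."""
--     current = []
--     total = 0
--     cands = [(x, 0) for x in range(2, n + 1)]  # (candidate, # coprime partners in current)
--     while cands:
--         best_x, best_g = cands[0]
--         for x, g in cands[1:]:
--             if g > best_g:
--                 best_x, best_g = x, g
--         if current and best_g == 0:
--             break
--         current.append(best_x)
--         total += best_g
--         cands = [(x, g + (1 if math.gcd(x, best_x) == 1 else 0))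
--                  for x, g in cands
--                  if x != best_x and x % best_x != 0 and best_x % x != 0]
--     return total, set(current)
-- ===== Notes on version B (the rewrite author's own statement) =====
-- stated objective: faster
-- what changed: B replaces A's per-round full rescan (divisibility check and gcd-gain recount of every candidate against the whole current set, plus a final quadratic pair count) by a pruned candidate list with per-candidate coprime-gain counters updated once per added element, and accumulates the returned pair count incrementally from the chosen gains.
import Mathlib
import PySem

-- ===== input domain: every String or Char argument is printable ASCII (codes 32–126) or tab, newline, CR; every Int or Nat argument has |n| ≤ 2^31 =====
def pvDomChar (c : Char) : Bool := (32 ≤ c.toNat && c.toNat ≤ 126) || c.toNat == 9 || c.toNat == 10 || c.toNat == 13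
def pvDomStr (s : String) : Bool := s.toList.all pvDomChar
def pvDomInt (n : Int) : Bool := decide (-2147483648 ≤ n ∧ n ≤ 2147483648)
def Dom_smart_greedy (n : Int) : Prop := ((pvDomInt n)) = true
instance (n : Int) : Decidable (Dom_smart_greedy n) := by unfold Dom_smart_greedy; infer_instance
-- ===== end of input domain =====

-- B replaces A's per-round full rescan of every candidate against the whole current set
-- by incrementally maintained per-candidate coprime-gain counters (objective: faster).

-- ===== PORT A =====
-- A's inline 'gain = sum(1 for c in current if gcd(x,c)==1)' loop, as a helper
def pvGain (current : List Int) (x : Int) : Int :=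
  current.foldl (fun g c => if Int.gcd x c == 1 then g + 1 else g) 0

-- A's inline 'all(x % c != 0 and c % x != 0 for c in current)'
def pvOk (current : List Int) (x : Int) : Bool :=
  current.all (fun c => PySem.Int.mod x c != 0 && PySem.Int.mod c x != 0)

-- the body of A's 'for x in all_elements' scan: (best_gain, best_add) fold
def pvBestA (current : List Int) (elems : List Int) : Int × Option Int :=
  elems.foldl (fun st x =>
    if current.contains x then st
    else if !(pvOk current x) then st
    else
      let gain := pvGain current x
      let gain := if current.length = 0 then 0 else gain
      if gain > st.1 then (gain, some x) else st) (-1, none)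

-- A's 'while True' loop (fuel only makes it total; it never runs out on the actual run)
def pvLoopA (fuel : Nat) (elems : List Int) (current : PySem.Set Int) : PySem.Set Int :=
  match fuel with
  | 0 => current
  | fuel + 1 =>
    match pvBestA current elems with
    | (_, none) => current
    | (bg, some bx) =>
      if 0 < current.length ∧ bg = 0 then current
      else pvLoopA fuel elems (PySem.Set.add current bx)

def coprime_pair_count (A : PySem.Set Int) : Int :=
  let A_list := PySem.List.sorted A (fun x => x) false
  (PySem.List.pyRange 0 (A_list.length : Int) 1).foldl (fun count i =>
    (PySem.List.pyRange (i + 1) (A_list.length : Int) 1).foldl (fun count j =>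
      if Int.gcd (PySem.List.pyGetD A_list i 0) (PySem.List.pyGetD A_list j 0) == 1
      then count + 1 else count) count) 0

def smart_greedy (n : Int) : Int × List Int :=
  let all_elements := PySem.List.pyRange 2 (n + 1) 1
  let current := pvLoopA (all_elements.length + 1) all_elements PySem.Set.empty
  (coprime_pair_count current, current)

-- ===== PORT B =====
-- B's 'first candidate with maximal counter' scan over cands[1:]
def pvPick (b : Int × Int) (rest : List (Int × Int)) : Int × Int :=
  rest.foldl (fun b p => if p.2 > b.2 then p else b) b

-- B's candidate-list rebuild: prune by divisibility with best_x, bump coprime counters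
def pvStepB (cands : List (Int × Int)) (bx : Int) : List (Int × Int) :=
  (cands.filter (fun p =>
      p.1 != bx && PySem.Int.mod p.1 bx != 0 && PySem.Int.mod bx p.1 != 0)).map
    (fun p => (p.1, p.2 + (if Int.gcd p.1 bx == 1 then 1 else 0)))

-- B's 'while cands' loop (fuel only makes it total; cands shrinks every round)
def pvLoopB (fuel : Nat) (current : List Int) (total : Int) (cands : List (Int × Int)) :
    Int × List Int :=
  match fuel with
  | 0 => (total, current)
  | fuel + 1 =>
    match cands with
    | [] => (total, current)
    | c0 :: rest =>
      let best := pvPick c0 rest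
      if 0 < current.length ∧ best.2 = 0 then (total, current)
      else pvLoopB fuel (current ++ [best.1]) (total + best.2) (pvStepB (c0 :: rest) best.1)

def smart_greedy_alt (n : Int) : Int × List Int :=
  let cands := (PySem.List.pyRange 2 (n + 1) 1).map (fun x => (x, (0 : Int)))
  let r := pvLoopB (cands.length + 1) [] 0 cands
  (r.1, PySem.Set.ofList r.2)

-- ===== PRECONDITION & SPEC =====
def Spec_smart_greedy (n : Int) (out : Int × List Int) : Prop := out = smart_greedy_alt n
instance (n : Int) (out : Int × List Int) : Decidable (Spec_smart_greedy n out) := by unfold Spec_smart_greedy; infer_instance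

-- ===== CLAIM (what is proved, stated in full; the proofs are below) =====
def Claim_equal_smart_greedy : Prop := ∀ (n : Int), Dom_smart_greedy n → Spec_smart_greedy n (smart_greedy n)

-- ===== LEMMAS AND PROOFS =====

-- the candidate list B maintains, characterised from A's point of view
def pvCandPred (current : List Int) (x : Int) : Bool := !current.contains x && pvOk current x

def pvCands (n : Int) (current : List Int) : List (Int × Int) :=
  ((PySem.List.pyRange 2 (n + 1) 1).filter (pvCandPred current)).map
    (fun x => (x, pvGain current x))

-- number of coprime pairs of a list, peeling the head
def pvPf : List Int → Int
  | [] => 0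
  | x :: l => (l.countP (fun c => Int.gcd x c == 1) : Int) + pvPf l

def pvInv (n : Int) (current : List Int) (total : Int) (cands : List (Int × Int)) : Prop :=
  current.Nodup ∧ cands = pvCands n current ∧ total = pvPf current

-- the double index loop of coprime_pair_count, on a bare list
def pvNc (M : List Int) : Int :=
  (PySem.List.pyRange 0 (M.length : Int) 1).foldl (fun count i =>
    (PySem.List.pyRange (i + 1) (M.length : Int) 1).foldl (fun count j =>
      if Int.gcd (PySem.List.pyGetD M i 0) (PySem.List.pyGetD M j 0) == 1
      then count + 1 else count) count) 0

theorem pvGain_shift (l : List Int) (x g : Int) :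
    l.foldl (fun g c => if Int.gcd x c == 1 then g + 1 else g) g = g + pvGain l x := by
  induction l generalizing g with
  | nil => simp [pvGain]
  | cons a l ih =>
    simp only [pvGain, List.foldl_cons]
    rw [ih, ih (if Int.gcd x a == 1 then 0 + 1 else 0)]
    split <;> omega

theorem pvGain_eq_countP (l : List Int) (x : Int) :
    pvGain l x = (l.countP (fun c => Int.gcd x c == 1) : Int) := by
  induction l with
  | nil => rfl
  | cons a l ih =>
    simp only [pvGain, List.foldl_cons, List.countP_cons]
    rw [pvGain_shift]
    rw [pvGain] at ih
    rw [show pvGain l x = List.foldl (fun g c => if (Int.gcd x c == 1) = true then g + 1 else g) 0 l from rfl, ih]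
    split <;> push_cast <;> omega

theorem pvGain_nonneg (l : List Int) (x : Int) : 0 ≤ pvGain l x := by
  rw [pvGain_eq_countP]; positivity

theorem pvGain_append (l : List Int) (x y : Int) :
    pvGain (l ++ [y]) x = pvGain l x + (if Int.gcd x y == 1 then 1 else 0) := by
  simp only [pvGain, List.foldl_append, List.foldl_cons, List.foldl_nil]
  rw [pvGain_shift]
  split <;> simp [pvGain]

theorem pvAdj' (l : List Int) (x : Int) :
    (if l = [] then (0 : Int) else pvGain l x) = pvGain l x := by
  cases l <;> simp [pvGain]

theorem pvPick_mem (rest : List (Int × Int)) (b : Int × Int) :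
    pvPick b rest = b ∨ pvPick b rest ∈ rest := by
  induction rest generalizing b with
  | nil => left; rfl
  | cons p rest ih =>
    simp only [pvPick, List.foldl_cons]
    rcases ih (if p.2 > b.2 then p else b) with h | h
    · rw [pvPick] at h; rw [h]; split
      · right; simp
      · left; rfl
    · rw [pvPick] at h; right; simp [h]

theorem pvPick_fold (rest : List (Int × Int)) (b : Int × Int) :
    rest.foldl (fun st (p : Int × Int) => if p.2 > st.1 then (p.2, some p.1) else st)
      (b.2, some b.1) = ((pvPick b rest).2, some (pvPick b rest).1) := by
  induction rest generalizing b with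
  | nil => rfl
  | cons p rest ih =>
    simp only [pvPick, List.foldl_cons] at *
    rw [show (if p.2 > (b.2, some b.1).1 then (p.2, some p.1) else (b.2, some b.1)) =
        ((if p.2 > b.2 then p else b).2, some ((if p.2 > b.2 then p else b).1)) by split <;> rfl]
    exact ih _

theorem pvBestA_eq (n : Int) (current : List Int) :
    pvBestA current (PySem.List.pyRange 2 (n + 1) 1) =
      (match pvCands n current with
       | [] => ((-1 : Int), (none : Option Int))
       | c0 :: rest => ((pvPick c0 rest).2, some (pvPick c0 rest).1)) := by
  have hmain : pvBestA current (PySem.List.pyRange 2 (n + 1) 1) =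
      (pvCands n current).foldl
        (fun st (p : Int × Int) => if p.2 > st.1 then (p.2, some p.1) else st) (-1, none) := by
    unfold pvCands
    rw [List.foldl_map, List.foldl_filter]
    unfold pvBestA
    apply PySem.List.foldl_congr_mem
    intro acc x _
    by_cases h1 : current.contains x <;> by_cases h2 : pvOk current x <;>
      simp [pvCandPred, h2, pvAdj']
  rw [hmain]
  cases hc : pvCands n current with
  | nil => rfl
  | cons c0 rest =>
    have hc0 : c0 ∈ pvCands n current := by rw [hc]; exact List.mem_cons_self
    obtain ⟨x, _, hxe⟩ := List.mem_map.mp hc0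
    have hge : 0 ≤ c0.2 := by rw [← hxe]; exact pvGain_nonneg current x
    simp only [List.foldl_cons]
    rw [show (if c0.2 > ((-1 : Int), (none : Option Int)).1 then (c0.2, some c0.1)
        else ((-1 : Int), (none : Option Int))) = (c0.2, some c0.1) by
      simp only; rw [if_pos (by omega)]]
    exact pvPick_fold rest c0

theorem pvStepB_eq (n : Int) (current : List Int) (bx : Int) :
    pvStepB (pvCands n current) bx = pvCands n (current ++ [bx]) := by
  unfold pvStepB pvCands
  rw [List.filter_map, List.map_map, List.filter_filter]
  have hm : ((fun p : Int × Int => (p.1, p.2 + if Int.gcd p.1 bx == 1 then 1 else 0)) ∘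
      fun x => (x, pvGain current x)) = fun x => (x, pvGain (current ++ [bx]) x) := by
    funext x; simp [Function.comp, pvGain_append]
  rw [hm]
  congr 1
  apply List.filter_congr
  intro x _
  simp only [Function.comp_apply, pvCandPred, pvOk, List.all_append, List.all_cons,
    List.all_nil, Bool.and_true, List.contains_append, List.contains_cons,
    List.contains_nil, Bool.or_false, Bool.not_or, bne]
  cases h1 : current.contains x <;> cases h2 : x == bx <;>
    cases h3 : PySem.Int.mod x bx == 0 <;> cases h4 : PySem.Int.mod bx x == 0 <;>
    cases h5 : current.all (fun c => !(PySem.Int.mod x c == 0) && !(PySem.Int.mod c x == 0)) <;>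
    simp_all [Bool.and_comm]

theorem pvPf_append (l : List Int) (y : Int) :
    pvPf (l ++ [y]) = pvPf l + pvGain l y := by
  induction l with
  | nil => simp [pvPf, pvGain]
  | cons a l ih =>
    simp only [pvPf, List.cons_append, List.countP_append, List.countP_cons, List.countP_nil,
      ih, pvGain_eq_countP, List.countP_cons]
    have hc : (Int.gcd y a == 1) = (Int.gcd a y == 1) := by rw [Int.gcd_comm]
    rw [hc]
    push_cast
    split <;> simp <;> omega

theorem pvPf_perm {l l' : List Int} (h : l.Perm l') : pvPf l = pvPf l' := by
  induction h with
  | nil => rfl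
  | cons a h ih => simp only [pvPf, ih, h.countP_eq]
  | swap a b l =>
    simp only [pvPf, List.countP_cons]
    have hc : (Int.gcd b a == 1) = (Int.gcd a b == 1) := by rw [Int.gcd_comm]
    rw [hc]
    push_cast
    ring
  | trans _ _ ih1 ih2 => rw [ih1, ih2]

theorem pvNc_sum (M : List Int) :
    pvNc M = ((PySem.List.pyRange 0 (M.length : Int) 1).map (fun i =>
      pvGain (M.drop (i + 1).toNat) (PySem.List.pyGetD M i 0))).sum := by
  unfold pvNc
  rw [PySem.List.foldl_congr_mem _ _
    (fun count i => count + pvGain (M.drop (i + 1).toNat) (PySem.List.pyGetD M i 0)) 0 ?_]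
  · rw [PySem.List.foldl_add]; simp
  · intro acc i hi
    have h0 : (0 : Int) ≤ i + 1 := by
      have := (PySem.List.mem_pyRange_one.mp hi).1; omega
    rw [PySem.List.foldl_pyRange_pyGetD' M 0
      (fun count c => if Int.gcd (PySem.List.pyGetD M i 0) c == 1 then count + 1 else count)
      acc h0]
    exact pvGain_shift ..

theorem pvNc_append (l : List Int) (y : Int) :
    pvNc (l ++ [y]) = pvNc l + pvGain l y := by
  rw [pvNc_sum, pvNc_sum]
  have hlen : (((l ++ [y]).length : Nat) : Int) = (l.length : Int) + 1 := by simp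
  rw [hlen, PySem.List.pyRange_one_succ_right (by positivity : (0 : Int) ≤ (l.length : Int))]
  rw [List.map_append, List.sum_append]
  have hlast : (List.map (fun i => pvGain ((l ++ [y]).drop (i + 1).toNat)
      (PySem.List.pyGetD (l ++ [y]) i 0)) [(l.length : Int)]).sum = 0 := by
    simp only [List.map_cons, List.map_nil, List.sum_cons, List.sum_nil]
    rw [show ((l.length : Int) + 1).toNat = l.length + 1 by omega]
    rw [List.drop_eq_nil_of_le (by simp)]
    simp [pvGain]
  rw [hlast, add_zero]
  rw [List.map_congr_left (fun i hi => ?_ :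
    ∀ i ∈ PySem.List.pyRange 0 (l.length : Int) 1,
      pvGain ((l ++ [y]).drop (i + 1).toNat) (PySem.List.pyGetD (l ++ [y]) i 0) =
      pvGain (l.drop (i + 1).toNat) (PySem.List.pyGetD l i 0) +
        (if Int.gcd (PySem.List.pyGetD l i 0) y == 1 then 1 else 0))]
  · rw [PySem.List.sum_map_add_int]
    congr 1
    rw [show (fun i => if Int.gcd (PySem.List.pyGetD l i 0) y == 1 then (1 : Int) else 0) =
        (fun c => if Int.gcd c y == 1 then (1 : Int) else 0) ∘ (fun i => PySem.List.pyGetD l i 0)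
      from rfl]
    rw [← List.map_map, PySem.List.map_pyGetD_pyRange_zero']
    rw [PySem.List.sum_map_ite_one_zero (fun c => Int.gcd c y == 1) l]
    rw [pvGain_eq_countP]
    congr 1
    apply List.countP_congr
    intro c _
    rw [Int.gcd_comm]
  · obtain ⟨hi0, hi1⟩ := PySem.List.mem_pyRange_one.mp hi
    have hd : (l ++ [y]).drop (i + 1).toNat = l.drop (i + 1).toNat ++ [y] := by
      apply List.drop_append_of_le_length; omega
    have hg : PySem.List.pyGetD (l ++ [y]) i 0 = PySem.List.pyGetD l i 0 := by
      rw [PySem.List.pyGetD_eq_getElem _ _ hi0 (by simp; omega),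
          PySem.List.pyGetD_eq_getElem _ _ hi0 (by omega)]
      exact List.getElem_append_left (by omega)
    rw [hd, hg, pvGain_append]

theorem pvNc_eq_pvPf (M : List Int) : pvNc M = pvPf M := by
  induction M using List.reverseRecOn with
  | nil => rfl
  | append_singleton l y ih => rw [pvNc_append, pvPf_append, ih]

theorem pvLoop_eq (fuel : Nat) (n : Int) (current : List Int) (total : Int)
    (cands : List (Int × Int)) (h : pvInv n current total cands) :
    pvLoopB fuel current total cands =
      (pvPf (pvLoopA fuel (PySem.List.pyRange 2 (n + 1) 1) current),
       pvLoopA fuel (PySem.List.pyRange 2 (n + 1) 1) current) ∧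
    (pvLoopA fuel (PySem.List.pyRange 2 (n + 1) 1) current).Nodup := by
  induction fuel generalizing current total cands with
  | zero =>
    obtain ⟨hnd, _, htot⟩ := h
    exact ⟨by rw [pvLoopB, pvLoopA, htot], by rw [pvLoopA]; exact hnd⟩
  | succ fuel ih =>
    obtain ⟨hnd, hcands, htot⟩ := h
    cases hc : pvCands n current with
    | nil =>
      rw [hcands, hc, pvLoopB, pvLoopA, pvBestA_eq n current, hc]
      exact ⟨by rw [htot], hnd⟩
    | cons c0 rest =>
      rw [hcands, hc, pvLoopB, pvLoopA, pvBestA_eq n current, hc]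
      simp only
      have hbm : pvPick c0 rest ∈ pvCands n current := by
        rw [hc]
        rcases pvPick_mem rest c0 with h | h
        · rw [h]; exact List.mem_cons_self
        · exact List.mem_cons_of_mem _ h
      obtain ⟨x, hxf, hxe⟩ := List.mem_map.mp hbm
      have hxp : pvCandPred current x = true := (List.mem_filter.mp hxf).2
      have hb1 : (pvPick c0 rest).1 = x := by rw [← hxe]
      have hb2 : (pvPick c0 rest).2 = pvGain current x := by rw [← hxe]
      have hnm : x ∉ current := by
        have := ((Bool.and_eq_true _ _).mp hxp).1
        simpa using this
      by_cases hstop : 0 < current.length ∧ (pvPick c0 rest).2 = 0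
      · rw [if_pos hstop, if_pos hstop]
        exact ⟨by rw [htot], hnd⟩
      · rw [if_neg hstop, if_neg hstop]
        have hadd : PySem.Set.add current (pvPick c0 rest).1 = current ++ [(pvPick c0 rest).1] := by
          apply PySem.Set.add_of_not_mem; rw [hb1]; exact hnm
        rw [hadd]
        apply ih
        refine ⟨?_, ?_, ?_⟩
        · rw [hb1]
          rw [List.nodup_append]
          refine ⟨hnd, List.nodup_singleton x, ?_⟩
          intro a ha b hbx
          rw [List.mem_singleton] at hbx
          subst hbx
          intro h
          subst h
          exact hnm ha
        · rw [show (c0 :: rest) = pvCands n current from hc.symm]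
          exact pvStepB_eq n current (pvPick c0 rest).1
        · rw [pvPf_append, htot, hb2, hb1]

-- ===== VERDICT (by name: the statement is the Claim_ definition above) =====
theorem smart_greedy_spec : Claim_equal_smart_greedy := by
  intro n _
  unfold Spec_smart_greedy smart_greedy smart_greedy_alt
  simp only [List.length_map]
  have hinv : pvInv n [] 0 ((PySem.List.pyRange 2 (n + 1) 1).map (fun x => (x, (0 : Int)))) := by
    refine ⟨List.nodup_nil, ?_, rfl⟩
    unfold pvCands pvCandPred pvOk
    simp [pvGain]
  obtain ⟨hB, hnd⟩ := pvLoop_eq ((PySem.List.pyRange 2 (n + 1) 1).length + 1) n [] 0 _ hinv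
  rw [show PySem.Set.empty = ([] : List Int) from rfl, hB]
  have hcpc : coprime_pair_count
      (pvLoopA ((PySem.List.pyRange 2 (n + 1) 1).length + 1) (PySem.List.pyRange 2 (n + 1) 1) []) =
      pvPf (pvLoopA ((PySem.List.pyRange 2 (n + 1) 1).length + 1)
        (PySem.List.pyRange 2 (n + 1) 1) []) := by
    rw [show coprime_pair_count
        (pvLoopA ((PySem.List.pyRange 2 (n + 1) 1).length + 1) (PySem.List.pyRange 2 (n + 1) 1) []) =
        pvNc (PySem.List.sorted
          (pvLoopA ((PySem.List.pyRange 2 (n + 1) 1).length + 1) (PySem.List.pyRange 2 (n + 1) 1) [])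
          (fun x => x) false) from rfl]
    rw [pvNc_eq_pvPf]
    exact pvPf_perm (PySem.List.sorted_perm _ _ _)
  rw [hcpc, PySem.Set.ofList_eq_self_of_nodup _ hnd]
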